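-- pv_equiv track=rewrite | github.com/Juriij/KSI_2024-2025 | 2. wave/Iterátory, generátory a lenivé vyhodnocování/main.py | generate_substrings
-- ===== SOURCE A (Python) =====
-- def generate_substrings(s: str):
--     n = 0
--     while True:
--         substrings = set()
--         for i in range(len(s)-n+1):
--             substrings.add(s[i: i+n])
--
--         if not substrings:
--             break
--
--         yield substrings
--         n += 1
-- ===== SOURCE B (Python) =====
-- def generate_substrings(s):
--     grouped = {}
--     L = len(s)
--     for i in range(L + 1):
--         for j in range(i, L + 1):
--             grouped.setdefault(j - i, set()).add(s[i:j])
--     for k in range(L + 1):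
--         yield grouped[k]
-- ===== Notes on version B (the rewrite author's own statement) =====
-- stated objective: alternative
-- what changed: Replaces the unbounded while-loop that rebuilds one set per length (with an extra empty-set probe pass to detect termination) by a single nested index pass over all (i,j) start/end pairs that groups slices into a dict keyed by length, followed by an ordered emission of grouped[0..len(s)].
import Mathlib
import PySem

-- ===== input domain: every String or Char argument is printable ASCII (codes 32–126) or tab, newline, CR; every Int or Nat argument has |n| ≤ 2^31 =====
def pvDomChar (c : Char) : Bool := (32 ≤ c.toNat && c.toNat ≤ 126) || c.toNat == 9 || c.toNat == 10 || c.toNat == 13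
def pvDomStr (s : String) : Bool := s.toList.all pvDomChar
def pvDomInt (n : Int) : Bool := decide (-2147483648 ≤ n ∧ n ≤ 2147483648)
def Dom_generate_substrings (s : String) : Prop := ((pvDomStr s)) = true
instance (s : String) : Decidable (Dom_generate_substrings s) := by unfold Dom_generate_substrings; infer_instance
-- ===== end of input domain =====

-- B replaces A's per-length while-loop (with its empty-set termination probe) by one nested
-- (i,j) pass grouping slices into a dict keyed by length, then emits grouped[0..len(s)] in order.

-- ===== PORT A =====
-- the body of one iteration of A's while-loop: the set of slices s[i:i+n] for i in range(len(s)-n+1)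
def pvARow (s : String) (n : Int) : PySem.Set String :=
  (PySem.List.pyRange 0 ((PySem.Str.len s : Int) - n + 1) 1).foldl
    (fun acc i => PySem.Set.add acc (PySem.Str.slice s (some i) (some (i + n))))
    PySem.Set.empty

-- A's 'while True' loop, fuel-bounded (the loop breaks after at most len(s)+1 iterations)
def pvALoop (s : String) (fuel : Nat) (n : Int) : List (List String) :=
  match fuel with
  | 0 => []
  | Nat.succ fuel =>
    let substrings := pvARow s n
    if substrings = [] then [] else substrings :: pvALoop s fuel (n + 1)

def generate_substrings (s : String) : List (List String) :=
  pvALoop s (s.length + 2) 0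

-- ===== PORT B =====
def generate_substrings_alt (s : String) : List (List String) :=
  let L : Int := (PySem.Str.len s : Int)
  let grouped : PySem.Dict Int (PySem.Set String) :=
    (PySem.List.pyRange 0 (L + 1) 1).foldl
      (fun d i =>
        (PySem.List.pyRange i (L + 1) 1).foldl
          (fun d j =>
            d.modify (j - i) PySem.Set.empty
              (fun st => PySem.Set.add st (PySem.Str.slice s (some i) (some j))))
          d)
      PySem.Dict.empty
  (PySem.List.pyRange 0 (L + 1) 1).map (fun k => grouped.getD k PySem.Set.empty)

-- ===== PRECONDITION & SPEC =====
def Spec_generate_substrings (s : String) (out : List (List String)) : Prop := out = generate_substrings_alt s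
instance (s : String) (out : List (List String)) : Decidable (Spec_generate_substrings s out) := by unfold Spec_generate_substrings; infer_instance

-- ===== CLAIM (what is proved, stated in full; the proofs are below) =====
def Claim_equal_generate_substrings : Prop := ∀ (s : String), Dom_generate_substrings s → Spec_generate_substrings s (generate_substrings s)

-- ===== LEMMAS AND PROOFS =====

-- pvARow as an ordered dedup of the list of slices of length n
def pvRowList (s : String) (n : Int) : List String :=
  (PySem.List.pyRange 0 ((PySem.Str.len s : Int) - n + 1) 1).map
    (fun i => PySem.Str.slice s (some i) (some (i + n)))

theorem pvARow_eq_ofList (s : String) (n : Int) :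
    pvARow s n = PySem.Set.ofList (pvRowList s n) := by
  simp [pvARow, pvRowList, PySem.Set.ofList_eq_foldl, List.foldl_map, PySem.Set.empty]

-- a nested foldl is a foldl over the flattened pair list
theorem pv_foldl_foldl {α β γ : Type} (l : List α) (g : α → List β) (f : γ → α → β → γ) (init : γ) :
    l.foldl (fun d i => (g i).foldl (fun d j => f d i j) d) init
      = (l.flatMap (fun i => (g i).map (fun j => (i, j)))).foldl (fun d p => f d p.1 p.2) init := by
  induction l generalizing init with
  | nil => rfl
  | cons x t ih => simp [List.foldl_append, List.foldl_map, ih]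

-- reading one key after a loop of modifies: only the hits on that key matter
theorem pv_getD_foldl_modify {β : Type} (l : List β) (key : β → Int)
    (f : β → PySem.Set String → PySem.Set String)
    (d : PySem.Dict Int (PySem.Set String)) (k : Int) :
    (l.foldl (fun d x => d.modify (key x) PySem.Set.empty (f x)) d).getD k PySem.Set.empty
      = (l.filter (fun x => key x == k)).foldl (fun v x => f x v) (d.getD k PySem.Set.empty) := by
  induction l generalizing d with
  | nil => rfl
  | cons x t ih =>
    simp only [List.foldl_cons, List.filter_cons]
    rw [ih, PySem.Dict.getD_modify]
    by_cases h : key x = k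
    · simp [h]
    · simp [h, Ne.symm h]

theorem pv_flatMap_congr {α β : Type} (l : List α) (f g : α → List β)
    (h : ∀ x ∈ l, f x = g x) : l.flatMap f = l.flatMap g := by
  induction l with
  | nil => rfl
  | cons x t ih =>
    simp only [List.flatMap_cons]
    rw [h x (by simp), ih (fun y hy => h y (by simp [hy]))]

theorem pv_flatMap_pure {α β : Type} (l : List α) (f : α → β) :
    l.flatMap (fun x => [f x]) = l.map f := by
  induction l with
  | nil => rfl
  | cons x t ih => simp [ih]

theorem pv_filter_flatMap {α β : Type} (l : List α) (g : α → List β) (p : β → Bool) :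
    (l.flatMap g).filter p = l.flatMap (fun a => (g a).filter p) := by
  induction l with
  | nil => rfl
  | cons x t ih => simp [List.filter_append, ih]

theorem pv_filter_beq_of_nodup {α : Type} [DecidableEq α] (l : List α) (hl : l.Nodup) (c : α) :
    l.filter (fun x => decide (x = c)) = if c ∈ l then [c] else [] := by
  induction l with
  | nil => simp
  | cons x t ih =>
    simp only [List.nodup_cons] at hl
    rw [List.filter_cons]
    by_cases h : x = c
    · subst h
      simp [ih hl.2, hl.1]
    · simp [h, Ne.symm h, ih hl.2]

-- the (i,j) pairs of B's nested pass whose length j-i equals k, for 0 ≤ k ≤ L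
theorem pv_pairs_filter (L k : Int) (h0 : 0 ≤ k) (hk : k ≤ L) :
    ((PySem.List.pyRange 0 (L + 1) 1).flatMap
        (fun i => (PySem.List.pyRange i (L + 1) 1).map (fun j => (i, j)))).filter
        (fun p => p.2 - p.1 == k)
      = (PySem.List.pyRange 0 (L - k + 1) 1).map (fun i => (i, i + k)) := by
  rw [pv_filter_flatMap]
  have hinner : ∀ i : Int,
      ((PySem.List.pyRange i (L + 1) 1).map (fun j => (i, j))).filter (fun p => p.2 - p.1 == k)
        = if i + k ≤ L then [(i, i + k)] else [] := by
    intro i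
    rw [List.filter_map]
    have hcong : (PySem.List.pyRange i (L + 1) 1).filter
        ((fun p : Int × Int => p.2 - p.1 == k) ∘ (fun j => (i, j)))
        = (PySem.List.pyRange i (L + 1) 1).filter (fun j => decide (j = i + k)) := by
      apply List.filter_congr
      intro j _
      simp only [Function.comp]
      by_cases h : j = i + k
      · simp [h]
      · have h2 : ¬ (j - i = k) := by omega
        simp [h, h2]
    rw [hcong, pv_filter_beq_of_nodup _ (PySem.List.nodup_pyRange_one i (L+1)) (i + k)]
    by_cases h : i + k ≤ L
    · rw [if_pos, if_pos h]
      · rfl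
      · rw [PySem.List.mem_pyRange_one]; omega
    · rw [if_neg, if_neg h]
      · rfl
      · rw [PySem.List.mem_pyRange_one]; omega
  rw [pv_flatMap_congr _ _ _ (fun i _ => hinner i)]
  rw [PySem.List.pyRange_one_append 0 (L - k + 1) (L + 1) (by omega) (by omega),
      List.flatMap_append]
  have h1 : (PySem.List.pyRange 0 (L - k + 1) 1).flatMap
      (fun i => if i + k ≤ L then [(i, i + k)] else [])
      = (PySem.List.pyRange 0 (L - k + 1) 1).map (fun i => (i, i + k)) := by
    rw [pv_flatMap_congr (g := fun i => [(i, i + k)])]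
    · exact pv_flatMap_pure _ _
    · intro i hi
      rw [PySem.List.mem_pyRange_one] at hi
      rw [if_pos (by omega)]
  have h2 : (PySem.List.pyRange (L - k + 1) (L + 1) 1).flatMap
      (fun i => if i + k ≤ L then [(i, i + k)] else []) = [] := by
    rw [pv_flatMap_congr (g := fun _ => [])]
    · simp
    · intro i hi
      rw [PySem.List.mem_pyRange_one] at hi
      rw [if_neg (by omega)]
  rw [h1, h2, List.append_nil]

-- emptiness of A's per-length set
theorem pvARow_eq_nil_iff (s : String) (n : Int) :
    pvARow s n = [] ↔ (PySem.Str.len s : Int) + 1 ≤ n := by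
  rw [pvARow_eq_ofList]
  constructor
  · intro h
    by_contra hn
    have hlt : (0 : Int) < (PySem.Str.len s : Int) - n + 1 := by omega
    rw [pvRowList, PySem.List.pyRange_one_cons (by omega)] at h
    simp [PySem.Set.ofList_cons] at h
  · intro h
    rw [pvRowList, PySem.List.pyRange_one_eq_nil (by omega)]
    rfl

theorem pvALoop_eq (s : String) (fuel : Nat) :
    ∀ n : Int, 0 ≤ n → ((PySem.Str.len s : Int) + 2 - n).toNat ≤ fuel →
      pvALoop s fuel n = (PySem.List.pyRange n ((PySem.Str.len s : Int) + 1) 1).map (pvARow s) := by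
  induction fuel with
  | zero =>
    intro n hn hf
    rw [PySem.List.pyRange_one_eq_nil (by omega)]
    rfl
  | succ fuel ih =>
    intro n hn hf
    show (if pvARow s n = [] then [] else pvARow s n :: pvALoop s fuel (n + 1)) = _
    by_cases h : (PySem.Str.len s : Int) + 1 ≤ n
    · rw [if_pos ((pvARow_eq_nil_iff s n).2 h), PySem.List.pyRange_one_eq_nil (by omega)]
      rfl
    · rw [if_neg (fun hc => h ((pvARow_eq_nil_iff s n).1 hc)),
          PySem.List.pyRange_one_cons (by omega), List.map_cons,
          ih (n + 1) (by omega) (by omega)]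

-- B's table read back at key k gives exactly A's set for length k
theorem pv_getD_eq_row (s : String) (k : Int) (h0 : 0 ≤ k) (hk : k ≤ (PySem.Str.len s : Int)) :
    ((PySem.List.pyRange 0 ((PySem.Str.len s : Int) + 1) 1).foldl
        (fun d i =>
          (PySem.List.pyRange i ((PySem.Str.len s : Int) + 1) 1).foldl
            (fun d j =>
              d.modify (j - i) PySem.Set.empty
                (fun st => PySem.Set.add st (PySem.Str.slice s (some i) (some j))))
            d)
        PySem.Dict.empty).getD k PySem.Set.empty
      = pvARow s k := by
  have h1 := pv_foldl_foldl (PySem.List.pyRange 0 ((PySem.Str.len s : Int) + 1) 1)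
    (fun i => PySem.List.pyRange i ((PySem.Str.len s : Int) + 1) 1)
    (fun d i j =>
      d.modify (j - i) PySem.Set.empty
        (fun st => PySem.Set.add st (PySem.Str.slice s (some i) (some j))))
    PySem.Dict.empty
  have h2 := pv_getD_foldl_modify
    ((PySem.List.pyRange 0 ((PySem.Str.len s : Int) + 1) 1).flatMap
      (fun i => (PySem.List.pyRange i ((PySem.Str.len s : Int) + 1) 1).map (fun j => (i, j))))
    (fun p => p.2 - p.1)
    (fun p st => PySem.Set.add st (PySem.Str.slice s (some p.1) (some p.2)))
    PySem.Dict.empty k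
  rw [h1, h2, PySem.Dict.getD_empty, pv_pairs_filter _ k h0 hk, List.foldl_map]
  rfl

-- ===== VERDICT (by name: the statement is the Claim_ definition above) =====
theorem generate_substrings_spec : Claim_equal_generate_substrings := by
  intro s _
  show generate_substrings s = generate_substrings_alt s
  rw [generate_substrings,
      pvALoop_eq s (s.length + 2) 0 le_rfl (by simp)]
  show _ = (PySem.List.pyRange 0 ((PySem.Str.len s : Int) + 1) 1).map _
  apply List.map_congr_left
  intro k hk
  rw [PySem.List.mem_pyRange_one] at hk
  exact (pv_getD_eq_row s k hk.1 (by omega)).symm
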